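-- pv_equiv track=rewrite | github.com/Charango21/Grupo-C-AUT-MATAS-Y-GRAM-TICAS | TP2_EJ9punto2.py | comentario_valido
-- ===== SOURCE A (Python) =====
-- def comentario_valido(cadena):
--     estado = "q0"
--
--     for simbolo in cadena:
--
--         if estado == "q0":
--             if simbolo == "/":
--                 estado = "q1"
--             else:
--                 return False
--
--         elif estado == "q1":
--             if simbolo == "*":
--                 estado = "q2"
--             else:
--                 return False
--
--         elif estado == "q2":
--             if simbolo in ["a", "b"]:
--                 estado = "q2"
--             elif simbolo == "*":
--                 estado = "q3"
--             else:
--                 return False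
--
--         elif estado == "q3":
--             if simbolo == "/":
--                 estado = "q4"
--             elif simbolo in ["a", "b"]:
--                 estado = "q2"
--             elif simbolo == "*":
--                 estado = "q3"
--             else:
--                 return False
--
--         elif estado == "q4":
--             return False
--
--     return estado == "q4"
-- ===== SOURCE B (Python) =====
-- def comentario_valido(cadena):
--     return (len(cadena) >= 4
--             and cadena.startswith("/*")
--             and cadena.endswith("*/")
--             and all(c in "ab*" for c in cadena[2:-2]))
-- ===== Notes on version B (the rewrite author's own statement) =====
-- stated objective: simpler
-- what changed: Replaces the explicit five-state DFA loop with a direct structural decomposition of the string: length at least 4, the two-character comment-open prefix, the two-character comment-close suffix, and an all() membership check over the interior slice.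
import Mathlib
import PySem

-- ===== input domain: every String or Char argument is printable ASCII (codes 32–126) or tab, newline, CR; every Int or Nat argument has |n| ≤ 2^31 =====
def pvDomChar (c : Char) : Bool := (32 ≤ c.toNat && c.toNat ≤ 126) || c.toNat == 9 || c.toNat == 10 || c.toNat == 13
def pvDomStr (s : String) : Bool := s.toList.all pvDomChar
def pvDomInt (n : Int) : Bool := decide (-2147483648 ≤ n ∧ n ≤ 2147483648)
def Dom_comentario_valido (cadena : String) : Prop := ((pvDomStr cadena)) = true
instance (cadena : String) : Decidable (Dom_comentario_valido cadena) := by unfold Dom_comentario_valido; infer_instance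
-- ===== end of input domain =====

-- B replaces A's five-state DFA loop by a structural check (length ≥ 4, "/*" prefix, "*/" suffix,
-- interior characters drawn from "ab*"); objective: simpler.


-- ===== PORT A =====
-- literal transliteration of A's for-loop with the string-valued state variable `estado`;
-- the final (unreachable) `else` keeps the state unchanged, as Python's if/elif chain does
def comentarioLoop : String → List Char → Bool
  | estado, [] => estado == "q4"
  | estado, simbolo :: rest =>
    if estado == "q0" then
      if simbolo == '/' then comentarioLoop "q1" rest else false
    else if estado == "q1" then
      if simbolo == '*' then comentarioLoop "q2" rest else false
    else if estado == "q2" then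
      if simbolo == 'a' || simbolo == 'b' then comentarioLoop "q2" rest
      else if simbolo == '*' then comentarioLoop "q3" rest
      else false
    else if estado == "q3" then
      if simbolo == '/' then comentarioLoop "q4" rest
      else if simbolo == 'a' || simbolo == 'b' then comentarioLoop "q2" rest
      else if simbolo == '*' then comentarioLoop "q3" rest
      else false
    else if estado == "q4" then false
    else comentarioLoop estado rest

def comentario_valido (cadena : String) : Bool :=
  comentarioLoop "q0" cadena.toList

-- ===== PORT B =====
def comentario_valido_alt (cadena : String) : Bool :=
  decide (4 ≤ PySem.Str.len cadena) &&
  PySem.Str.startswith cadena "/*" &&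
  PySem.Str.endswith cadena "*/" &&
  (PySem.Str.slice cadena (some 2) (some (-2))).toList.all
    (fun c => PySem.Chars.isIn [c] "ab*".toList)

-- ===== PRECONDITION & SPEC =====
def Spec_comentario_valido (cadena : String) (out : Bool) : Prop := out = comentario_valido_alt cadena
instance (cadena : String) (out : Bool) : Decidable (Spec_comentario_valido cadena out) := by unfold Spec_comentario_valido; infer_instance

-- ===== CLAIM (what is proved, stated in full; the proofs are below) =====
def Claim_equal_comentario_valido : Prop := ∀ (cadena : String), Dom_comentario_valido cadena → Spec_comentario_valido cadena (comentario_valido cadena)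

-- ===== LEMMAS AND PROOFS =====

-- characterisation of A's DFA from states q2/q3: the remaining input is a run of a/b/* ending in "*/"
def midOK : List Char → Bool
  | [] => false
  | c :: r =>
    if r = ['/'] then c == '*'
    else if r = [] then false
    else (c == 'a' || c == 'b' || c == '*') && midOK r

lemma midOK_ab {c : Char} (h : c = 'a' ∨ c = 'b') (r : List Char) : midOK (c :: r) = midOK r := by
  by_cases hr : r = ['/'] <;> by_cases hn : r = []
  · simp [hr] at hn
  · rcases h with h | h <;> simp [midOK, hr, h]
  · subst hn; rcases h with h | h <;> simp [midOK]
  · rcases h with h | h <;> simp [midOK, hr, hn, h]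

lemma midOK_star (r : List Char) : midOK ('*' :: r) = (midOK r || decide (r = ['/'])) := by
  by_cases hr : r = ['/'] <;> by_cases hn : r = []
  · simp [hr] at hn
  · subst hr; simp [midOK]
  · subst hn; simp [midOK]
  · simp [midOK, hr, hn]

lemma midOK_other {c : Char} (h1 : ¬ (c = 'a' ∨ c = 'b')) (h2 : c ≠ '*') (r : List Char) :
    midOK (c :: r) = false := by
  have ha : c ≠ 'a' := fun h => h1 (Or.inl h)
  have hb : c ≠ 'b' := fun h => h1 (Or.inr h)
  by_cases hr : r = ['/'] <;> by_cases hn : r = []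
  · simp [hr] at hn
  · simp [midOK, hr, h2]
  · subst hn; simp [midOK]
  · simp [midOK, hr, hn, ha, hb, h2]

lemma loop_q2_q3 (l : List Char) :
    comentarioLoop "q2" l = midOK l ∧
    comentarioLoop "q3" l = (midOK l || decide (l = ['/'])) := by
  induction l with
  | nil => simp [comentarioLoop, midOK]
  | cons c r ih =>
    obtain ⟨ih2, ih3⟩ := ih
    by_cases hab : c = 'a' ∨ c = 'b'
    · have hc : (c == 'a' || c == 'b') = true := by rcases hab with h | h <;> simp [h]
      have hs : c ≠ '/' := by rcases hab with h | h <;> simp [h]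
      constructor
      · simp [comentarioLoop, hc, ih2, midOK_ab hab]
      · simp [comentarioLoop, hc, hs, ih2, midOK_ab hab]
    · by_cases hst : c = '*'
      · subst hst
        constructor
        · simp [comentarioLoop, ih3, midOK_star]
        · simp [comentarioLoop, ih3, midOK_star]
      · by_cases hs : c = '/'
        · subst hs
          constructor
          · simp [comentarioLoop, midOK_other hab hst]
          · cases r with
            | nil => simp [comentarioLoop, midOK_other hab hst]
            | cons d t => simp [comentarioLoop, midOK_other hab hst]
        · constructor
          · simp [comentarioLoop, midOK_other hab hst, hab, hst]
          · simp [comentarioLoop, midOK_other hab hst, hab, hst, hs]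

lemma midOK_eq (r : List Char) :
    midOK r = (decide (2 ≤ r.length) &&
      decide (r.drop (r.length - 2) = ['*', '/']) &&
      (r.take (r.length - 2)).all (fun c => c == 'a' || c == 'b' || c == '*')) := by
  induction r with
  | nil => simp [midOK]
  | cons c t ih =>
    by_cases h1 : t = ['/']
    · subst h1; simp [midOK, Bool.beq_eq_decide_eq]
    · cases t with
      | nil => simp [midOK]
      | cons d u =>
        by_cases hu : u = []
        · subst hu
          have hd : d ≠ '/' := by simpa using h1
          simp [midOK, hd, Bool.beq_eq_decide_eq]
        · have hlen : u.length - 1 + 1 = u.length := by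
            cases u with | nil => exact absurd rfl hu | cons _ _ => simp
          have e1 : (c :: d :: u).length - 2 = u.length := by simp
          have e2 : (d :: u).length - 2 = u.length - 1 := by simp
          rw [midOK, if_neg h1, if_neg (by simp), ih, e1, e2]
          rw [show (c :: d :: u).drop u.length = (d :: u).drop (u.length - 1) from by
                rw [← hlen, List.drop_succ_cons, hlen],
              show (c :: d :: u).take u.length = c :: (d :: u).take (u.length - 1) from by
                rw [← hlen, List.take_succ_cons, hlen]]
          have h2 : 1 ≤ u.length := List.length_pos_of_ne_nil hu
          simp [h2]
          rw [Bool.and_left_comm]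

lemma isIn_singleton (c : Char) :
    PySem.Chars.isIn [c] ['a', 'b', '*'] = (c == 'a' || c == 'b' || c == '*') := by
  rw [Bool.eq_iff_iff]
  simp [PySem.Chars.isIn_iff_infix, List.singleton_infix_iff, or_assoc]

lemma startswith_two (x y a b : Char) (r : List Char) :
    PySem.Chars.startswith (x :: y :: r) [a, b] = (x == a && y == b) := by
  rw [Bool.eq_iff_iff]
  simp only [PySem.Chars.startswith_iff, List.cons_prefix_cons,
    Bool.and_eq_true, beq_iff_eq]
  constructor
  · rintro ⟨h1, h2, -⟩; exact ⟨h1.symm, h2.symm⟩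
  · rintro ⟨h1, h2⟩; exact ⟨h1.symm, h2.symm, List.nil_prefix⟩

lemma main_list (l : List Char) :
    comentarioLoop "q0" l =
      (decide ((4 : Int) ≤ (l.length : Int)) && PySem.Chars.startswith l ['/', '*'] &&
       PySem.Chars.endswith l ['*', '/'] &&
       (PySem.List.slice l (some 2) (some (-2))).all
         (fun c => c == 'a' || c == 'b' || c == '*')) := by
  match l with
  | [] => decide
  | [c] => by_cases h : c = '/' <;> simp [comentarioLoop, h]
  | c0 :: c1 :: r =>
    by_cases h0 : c0 = '/'
    · subst h0
      by_cases h1 : c1 = '*'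
      · subst h1
        rw [show comentarioLoop "q0" ('/' :: '*' :: r) = comentarioLoop "q2" r from by
              simp [comentarioLoop],
            (loop_q2_q3 r).1, midOK_eq, startswith_two]
        by_cases h2 : 2 ≤ r.length
        · obtain ⟨k, hk⟩ : ∃ k, r.length = k + 2 := ⟨r.length - 2, by omega⟩
          have hlen4 : ((4 : Int) ≤ (r.length : Int) + 1 + 1) := by omega
          have hE : PySem.Chars.endswith ('/' :: '*' :: r) ['*', '/'] =
              decide (r.drop (r.length - 2) = ['*', '/']) := by
            rw [Bool.eq_iff_iff]
            rw [PySem.Chars.endswith_iff, List.suffix_iff_eq_drop]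
            have hL : ('/' :: '*' :: r).length - (['*', '/'] : List Char).length = k + 2 := by
              simp [hk]
            rw [hL, List.drop_succ_cons, List.drop_succ_cons, hk,
                show k + 2 - 2 = k from by omega]
            simp [eq_comm]
          have hS : PySem.List.slice ('/' :: '*' :: r) (some 2) (some (-2)) =
              r.take (r.length - 2) := by
            simp only [PySem.List.slice]
            rw [show PySem.List.clampIdx ('/' :: '*' :: r).length 2 = 2 from by
                  rw [show (2 : Int) = ((2 : Nat) : Int) from rfl,
                      PySem.List.clampIdx_natCast]; simp,
                show PySem.List.clampIdx ('/' :: '*' :: r).length (-2) = r.length from by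
                  simp]
            simp
          rw [hE, hS]
          simp [h2, hlen4]
        · have h4 : ¬ ((4 : Int) ≤ (r.length : Int) + 1 + 1) := by omega
          simp [h2, h4]
      · rw [show comentarioLoop "q0" ('/' :: c1 :: r) = false from by
              simp [comentarioLoop, h1], startswith_two]
        simp [h1]

    · rw [show comentarioLoop "q0" (c0 :: c1 :: r) = false from by
            simp [comentarioLoop, h0], startswith_two]
      simp [h0]

-- ===== VERDICT (by name: the statement is the Claim_ definition above) =====
theorem comentario_valido_spec : Claim_equal_comentario_valido := by
  intro cadena _
  unfold Spec_comentario_valido comentario_valido comentario_valido_alt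
  simp only [PySem.Str.len_eq, PySem.Str.startswith_eq, PySem.Str.endswith_eq,
    PySem.Str.toList_slice, PySem.Chars.slice_eq_listSlice]
  rw [show ("/*" : String).toList = ['/', '*'] from rfl,
      show ("*/" : String).toList = ['*', '/'] from rfl,
      show ("ab*" : String).toList = ['a', 'b', '*'] from rfl]
  simp only [isIn_singleton]
  exact main_list cadena.toList
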